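-- pv_equiv track=rewrite | github.com/Shivam-baghel/Python_Scaler | 2. Data Structures and Algorithm/1. Intermediate/09. Maths-Modular Airthmetic Introduction/In Session questions/Number%P.py | arrayMod
-- ===== SOURCE A (Python) =====
-- def arrayMod(arr: tuple, p: int):
--     lengthOfArray = len(arr)
--     result = 0
--     x = 1
--     for i in range(lengthOfArray - 1, -1, -1):
--         digit = arr[i] % p
--         result = (result + (digit * x) % p) % p
--         x = (x * 10) % p
--
--     return result
-- ===== SOURCE B (Python) =====
-- def arrayMod(arr: tuple, p: int):
--     # Horner's method: traverse digits most-significant first, no power-of-ten variable.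
--     result = 0
--     for d in arr:
--         result = (result * 10 + d) % p
--     return result
-- ===== Notes on version B (the rewrite author's own statement) =====
-- stated objective: faster
-- what changed: Replaces the backward traversal that maintains a power-of-ten accumulator x (three % reductions per digit) by forward Horner's method result = (result*10 + d) % p (one % per digit), dropping x entirely; Pre_ excludes only p = 0 with a nonempty array, where both A and B raise ZeroDivisionError.
import Mathlib
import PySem

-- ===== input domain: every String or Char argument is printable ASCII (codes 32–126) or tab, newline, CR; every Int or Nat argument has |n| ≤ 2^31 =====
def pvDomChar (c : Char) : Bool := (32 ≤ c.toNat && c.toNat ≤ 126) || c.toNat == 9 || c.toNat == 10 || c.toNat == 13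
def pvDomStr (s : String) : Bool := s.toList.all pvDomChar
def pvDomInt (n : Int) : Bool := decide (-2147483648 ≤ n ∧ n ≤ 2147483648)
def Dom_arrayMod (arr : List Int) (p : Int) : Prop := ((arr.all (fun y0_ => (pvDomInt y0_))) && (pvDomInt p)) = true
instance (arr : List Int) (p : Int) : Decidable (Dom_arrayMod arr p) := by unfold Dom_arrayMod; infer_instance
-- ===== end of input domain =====

-- B replaces A's backward traversal with its maintained power-of-ten accumulator by
-- forward Horner's method (result = (result*10 + d) % p); same O(n) cost, plainer loop.

-- ===== PORT A =====
def arrayMod (arr : List Int) (p : Int) : Int :=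
  let lengthOfArray : Int := arr.length
  let s := (PySem.List.pyRange (lengthOfArray - 1) (-1) (-1)).foldl
    (fun (s : Int × Int) (i : Int) =>
      let digit := PySem.Int.mod (PySem.List.pyGetD arr i 0) p
      (PySem.Int.mod (s.1 + PySem.Int.mod (digit * s.2) p) p,
       PySem.Int.mod (s.2 * 10) p))
    (0, 1)
  s.1

-- ===== PORT B =====
def arrayMod_alt (arr : List Int) (p : Int) : Int :=
  arr.foldl (fun result d => PySem.Int.mod (result * 10 + d) p) 0

-- ===== PRECONDITION & SPEC =====
-- Pre_ excludes exactly the inputs where Python raises ZeroDivisionError (p = 0 with a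
-- nonempty array, where '% p' is executed); both A and B raise there.
def Pre_arrayMod (arr : List Int) (p : Int) : Prop := p ≠ 0 ∨ arr = []
instance (arr : List Int) (p : Int) : Decidable (Pre_arrayMod arr p) := by unfold Pre_arrayMod; infer_instance
def pvWitness_arrayMod : List Int × Int := ([3, 1, 4], 7)
def Spec_arrayMod (arr : List Int) (p : Int) (out : Int) : Prop := out = arrayMod_alt arr p
instance (arr : List Int) (p : Int) (out : Int) : Decidable (Spec_arrayMod arr p out) := by unfold Spec_arrayMod; infer_instance

-- ===== CLAIM (what is proved, stated in full; the proofs are below) =====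
def Claim_equal_arrayMod : Prop := ∀ (arr : List Int) (p : Int), Dom_arrayMod arr p → Pre_arrayMod arr p → Spec_arrayMod arr p (arrayMod arr p)

-- ===== LEMMAS AND PROOFS =====

-- A's per-index step, on the digit value (state = (result, x)).
def pvStepA (p : Int) (s : Int × Int) (d : Int) : Int × Int :=
  (Int.fmod (s.1 + Int.fmod (Int.fmod d p * s.2) p) p, Int.fmod (s.2 * 10) p)

-- the plain (un-reduced) Horner accumulation
def pvHStep (r d : Int) : Int := r * 10 + d

-- fmod is invariant under emod-congruence (PySem.Int.mod is definitionally Int.fmod)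
theorem pv_fmod_congr {a b : Int} (p : Int) (h : Int.ModEq p a b) :
    Int.fmod a p = Int.fmod b p := by
  have hd : p ∣ a ↔ p ∣ b := by
    rw [Int.dvd_iff_emod_eq_zero, Int.dvd_iff_emod_eq_zero, h]
  rw [Int.fmod_eq_emod, Int.fmod_eq_emod, h]
  simp [hd]

theorem pv_fmod_modeq (a p : Int) : Int.ModEq p (Int.fmod a p) a := by
  unfold Int.ModEq
  rw [Int.fmod_eq_emod]
  split_ifs with h
  · simp
  · have : (a % p + p) % p = a % p % p := by
      simpa using Int.add_mul_emod_self_left (a := a % p) (b := p) (c := 1)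
    rw [this, Int.emod_emod_of_dvd _ dvd_rfl]

-- shifting the Horner seed out
theorem pv_hfold_shift (l : List Int) : ∀ a : Int,
    l.foldl pvHStep a = a * 10 ^ l.length + l.foldl pvHStep 0 := by
  induction l with
  | nil => intro a; simp
  | cons d l ih =>
      intro a
      simp only [List.foldl_cons, List.length_cons]
      rw [ih (pvHStep a d), ih (pvHStep 0 d)]
      simp only [pvHStep]
      ring

-- A's loop invariant: processing the reversed digit list d :: l
theorem pv_stepA_inv (p : Int) (l : List Int) : ∀ (d r x : Int),
    (d :: l).reverse.foldl (pvStepA p) (r, x) =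
      (Int.fmod (r + x * ((d :: l).foldl pvHStep 0)) p,
       Int.fmod (x * 10 ^ (d :: l).length) p) := by
  induction l with
  | nil =>
      intro d r x
      simp only [List.reverse_cons, List.reverse_nil, List.nil_append, List.foldl_cons,
        List.foldl_nil, List.length_cons, List.length_nil, pvStepA, pvHStep]
      rw [Prod.mk.injEq]
      norm_num
      apply pv_fmod_congr
      have h2 : Int.ModEq p (Int.fmod d p * x) (x * d) := by
        calc Int.fmod d p * x ≡ d * x [ZMOD p] := (pv_fmod_modeq d p).mul_right x
          _ = x * d := by ring
      exact Int.ModEq.add_left r h2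
  | cons e l ih =>
      intro d r x
      have hsplit : (d :: e :: l).reverse.foldl (pvStepA p) (r, x) =
          pvStepA p ((e :: l).reverse.foldl (pvStepA p) (r, x)) d := by
        simp [List.foldl_append]
      rw [hsplit, ih e r x]
      simp only [pvStepA, List.length_cons]
      rw [Prod.mk.injEq]
      constructor
      · apply pv_fmod_congr
        have h1 : Int.ModEq p (Int.fmod (r + x * ((e :: l).foldl pvHStep 0)) p)
            (r + x * ((e :: l).foldl pvHStep 0)) := pv_fmod_modeq _ p
        have h2 : Int.ModEq p
            (Int.fmod (Int.fmod d p * Int.fmod (x * 10 ^ (l.length + 1)) p) p)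
            (d * (x * 10 ^ (l.length + 1))) :=
          (pv_fmod_modeq _ p).trans ((pv_fmod_modeq d p).mul (pv_fmod_modeq _ p))
        refine (h1.add h2).trans (by
          rw [show (d :: e :: l).foldl pvHStep 0 = (e :: l).foldl pvHStep d by
                simp [pvHStep],
              pv_hfold_shift (e :: l) d]
          unfold Int.ModEq
          congr 1
          simp only [List.length_cons]
          ring)
      · apply pv_fmod_congr
        refine ((pv_fmod_modeq _ p).mul_right 10).trans ?_
        unfold Int.ModEq
        congr 1
        ring

-- the reversed index range is the reversed range of naturals
theorem pv_pyRange_rev (n : Nat) :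
    PySem.List.pyRange ((n : Int) - 1) (-1) (-1) =
      ((List.range n).map (fun k : Nat => (k : Int))).reverse := by
  induction n with
  | zero => rfl
  | succ n ih =>
      have h : (-1 : Int) < ((n + 1 : Nat) : Int) - 1 := by push_cast; omega
      rw [PySem.List.pyRange_neg_one_cons h,
        show ((n + 1 : Nat) : Int) - 1 - 1 = (n : Int) - 1 by push_cast; ring, ih,
        List.range_succ]
      simp only [List.map_append, List.reverse_append, List.map_cons, List.map_nil,
        List.reverse_cons, List.reverse_nil, List.nil_append, List.cons_append]
      push_cast
      norm_num

theorem pv_map_getD_range (arr : List Int) :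
    (List.range arr.length).map (fun k : Nat => PySem.List.pyGetD arr ((k : Nat) : Int) 0) = arr := by
  rw [show (fun k : Nat => PySem.List.pyGetD arr ((k : Nat) : Int) 0) = (fun k : Nat => arr.getD k 0) from
    funext (fun k => PySem.List.pyGetD_natCast arr k 0)]
  apply List.ext_getElem
  · simp
  · intro i h1 h2
    simp at h1 ⊢
    simp [List.getElem?_eq_getElem h1]

-- A computes fmod of the Horner value (nonempty array)
theorem pv_A_eq (d : Int) (l : List Int) (p : Int) :
    arrayMod (d :: l) p = Int.fmod ((d :: l).foldl pvHStep 0) p := by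
  have hR : List.foldl
      (fun (s : Int × Int) (k : Nat) => pvStepA p s (PySem.List.pyGetD (d :: l) ((k : Nat) : Int) 0))
      (0, 1) (List.range (d :: l).length).reverse
      = (d :: l).reverse.foldl (pvStepA p) (0, 1) := by
    conv_rhs => rw [← pv_map_getD_range (d :: l)]
    rw [← List.map_reverse, List.foldl_map]
  have hR1 := congrArg Prod.fst hR
  simp only [arrayMod]
  rw [pv_pyRange_rev (d :: l).length, ← List.map_reverse, List.foldl_map]
  exact hR1.trans (by rw [pv_stepA_inv p l d 0 1]; simp)

-- B's loop reduces the Horner fold modulo p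
theorem pv_B_fold (p : Int) (l : List Int) : ∀ a : Int,
    l.foldl (fun result d => PySem.Int.mod (result * 10 + d) p) (Int.fmod a p) =
      Int.fmod (l.foldl pvHStep a) p := by
  induction l with
  | nil => intro a; rfl
  | cons d l ih =>
      intro a
      have hc : PySem.Int.mod (Int.fmod a p * 10 + d) p = Int.fmod (a * 10 + d) p :=
        pv_fmod_congr p (((pv_fmod_modeq a p).mul_right 10).add_right d)
      simp only [List.foldl_cons, hc, ih (a * 10 + d), pvHStep]

theorem pv_B_eq (d : Int) (l : List Int) (p : Int) :
    arrayMod_alt (d :: l) p = Int.fmod ((d :: l).foldl pvHStep 0) p := by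
  unfold arrayMod_alt
  have h0 : PySem.Int.mod (0 * 10 + d) p = Int.fmod d p := by norm_num; rfl
  simp only [List.foldl_cons, h0, pv_B_fold p l d]
  simp [pvHStep]

-- ===== VERDICT (by name: the statement is the Claim_ definition above) =====
theorem arrayMod_spec : Claim_equal_arrayMod := by
  intro arr p _ _
  unfold Spec_arrayMod
  cases arr with
  | nil => rfl
  | cons d l => rw [pv_A_eq, pv_B_eq]
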